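-- pv_equiv track=rewrite | github.com/ShanBirch/shanbot | conservative_set_progressions.py | get_exercise_type
-- ===== SOURCE A (Python) =====
-- def get_exercise_type(exercise_name):
--     """Determine exercise type for progression increments"""
--     exercise_lower = exercise_name.lower()
--
--     # Dumbbell exercises
--     if any(keyword in exercise_lower for keyword in ['dumbbell', 'db', 'dumbell', 'hammer curls', 'bicep curl']):
--         return 'dumbbell'
--
--     # Barbell exercises
--     if any(keyword in exercise_lower for keyword in ['barbell', 'bb', 'bench press', 'squat', 'deadlift']):
--         return 'barbell'
--
--     # Cable exercises
--     if any(keyword in exercise_lower for keyword in ['cable', 'lat pull', 'seated row', 'tricep pushdown']):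
--         return 'cable'
--
--     # Machine exercises
--     if any(keyword in exercise_lower for keyword in ['machine', 'leg press', 'leg extension', 'seated']):
--         return 'machine'
--
--     # Bodyweight exercises
--     if any(keyword in exercise_lower for keyword in ['chin up', 'pull up', 'push up', 'plank', 'hanging']):
--         return 'bodyweight'
--
--     return 'dumbbell'  # Default
-- ===== SOURCE B (Python) =====
-- _CATEGORIES = ['dumbbell', 'barbell', 'cable', 'machine', 'bodyweight']
--
-- _KEYWORD_RANKS = [
--     ('dumbbell', 0), ('db', 0), ('dumbell', 0), ('hammer curls', 0), ('bicep curl', 0),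
--     ('barbell', 1), ('bb', 1), ('bench press', 1), ('squat', 1), ('deadlift', 1),
--     ('cable', 2), ('lat pull', 2), ('seated row', 2), ('tricep pushdown', 2),
--     ('machine', 3), ('leg press', 3), ('leg extension', 3), ('seated', 3),
--     ('chin up', 4), ('pull up', 4), ('push up', 4), ('plank', 4), ('hanging', 4),
-- ]
--
--
-- def get_exercise_type(exercise_name):
--     """Single left-to-right scan over the lowered name: at each position keep the
--     smallest rank of any keyword starting there; map the best rank to its category."""
--     s = exercise_name.lower()
--     best = 5
--     for i in range(len(s)):
--         for kw, rank in _KEYWORD_RANKS: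
--             if rank < best and s.startswith(kw, i):
--                 best = rank
--     return _CATEGORIES[best] if best < 5 else 'dumbbell'
-- ===== Notes on version B (the rewrite author's own statement) =====
-- stated objective: alternative
-- what changed: Replaced the five category-major any-substring branches by a single position-major scan: one pass over the lowered name keeping the minimum rank of any keyword that starts at each position, then mapping that rank to its category (5 = no match = default).
import Mathlib
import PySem

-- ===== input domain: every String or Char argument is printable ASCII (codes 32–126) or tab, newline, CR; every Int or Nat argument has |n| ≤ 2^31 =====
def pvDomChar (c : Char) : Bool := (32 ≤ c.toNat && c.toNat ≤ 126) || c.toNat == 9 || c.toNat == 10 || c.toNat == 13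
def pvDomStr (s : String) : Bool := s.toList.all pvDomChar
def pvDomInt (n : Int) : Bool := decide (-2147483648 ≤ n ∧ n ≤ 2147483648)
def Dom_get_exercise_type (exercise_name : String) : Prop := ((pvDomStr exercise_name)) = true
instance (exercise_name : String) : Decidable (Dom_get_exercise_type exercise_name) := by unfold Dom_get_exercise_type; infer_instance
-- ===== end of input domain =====

-- B replaces A's category-major any-substring branches by one position-major scan of the
-- lowered name keeping the minimum matching keyword rank (alternative algorithm, same cost).

-- ===== PORT A =====
-- Port of A: five sequential if/any branches over hard-coded keyword lists.
def get_exercise_type (exercise_name : String) : String :=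
  let exercise_lower := PySem.Str.lower exercise_name
  if ["dumbbell", "db", "dumbell", "hammer curls", "bicep curl"].any
      (fun keyword => PySem.Str.isIn keyword exercise_lower) then "dumbbell"
  else if ["barbell", "bb", "bench press", "squat", "deadlift"].any
      (fun keyword => PySem.Str.isIn keyword exercise_lower) then "barbell"
  else if ["cable", "lat pull", "seated row", "tricep pushdown"].any
      (fun keyword => PySem.Str.isIn keyword exercise_lower) then "cable"
  else if ["machine", "leg press", "leg extension", "seated"].any
      (fun keyword => PySem.Str.isIn keyword exercise_lower) then "machine"
  else if ["chin up", "pull up", "push up", "plank", "hanging"].any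
      (fun keyword => PySem.Str.isIn keyword exercise_lower) then "bodyweight"
  else "dumbbell"

-- ===== PORT B =====
def exCategories : List String := ["dumbbell", "barbell", "cable", "machine", "bodyweight"]

def exKeywordRanks : List (String × Nat) :=
  [("dumbbell", 0), ("db", 0), ("dumbell", 0), ("hammer curls", 0), ("bicep curl", 0),
   ("barbell", 1), ("bb", 1), ("bench press", 1), ("squat", 1), ("deadlift", 1),
   ("cable", 2), ("lat pull", 2), ("seated row", 2), ("tricep pushdown", 2),
   ("machine", 3), ("leg press", 3), ("leg extension", 3), ("seated", 3),
   ("chin up", 4), ("pull up", 4), ("push up", 4), ("plank", 4), ("hanging", 4)]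

-- inner loop of Source B: s.startswith(kw, i) is exact as 'kw prefix of s dropped i' for 0 ≤ i ≤ len(s)
def scanPos (s : List Char) (best : Nat) (i : Nat) : Nat :=
  exKeywordRanks.foldl
    (fun b p => if p.2 < b && PySem.Chars.startswith (s.drop i) p.1.toList then p.2 else b) best

def get_exercise_type_alt (exercise_name : String) : String :=
  let s := (PySem.Str.lower exercise_name).toList
  let best := (List.range s.length).foldl (scanPos s) 5
  if best < 5 then exCategories.getD best "dumbbell" else "dumbbell"

-- ===== PRECONDITION & SPEC =====
def Spec_get_exercise_type (exercise_name : String) (out : String) : Prop := out = get_exercise_type_alt exercise_name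
instance (exercise_name : String) (out : String) : Decidable (Spec_get_exercise_type exercise_name out) := by unfold Spec_get_exercise_type; infer_instance

-- ===== CLAIM (what is proved, stated in full; the proofs are below) =====
def Claim_equal_get_exercise_type : Prop := ∀ (exercise_name : String), Dom_get_exercise_type exercise_name → Spec_get_exercise_type exercise_name (get_exercise_type exercise_name)

-- ===== LEMMAS AND PROOFS =====

-- A min-fold is ≤ r iff the start is or some element hits below r.
theorem foldl_le_iff {α : Type} (r : Nat) (f : Nat → α → Nat) (P : α → Prop)
    (hf : ∀ a x, (f a x ≤ r ↔ a ≤ r ∨ P x)) :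
    ∀ (l : List α) (a : Nat), List.foldl f a l ≤ r ↔ a ≤ r ∨ ∃ x ∈ l, P x := by
  intro l
  induction l with
  | nil => simp
  | cons x xs ih =>
      intro a
      rw [List.foldl_cons, ih, hf]
      simp [or_assoc]

theorem scanPos_le_iff (s : List Char) (r : Nat) (i : Nat) (a : Nat) :
    scanPos s a i ≤ r ↔ a ≤ r ∨ ∃ p ∈ exKeywordRanks, p.2 ≤ r ∧
      PySem.Chars.startswith (s.drop i) p.1.toList = true := by
  unfold scanPos
  refine foldl_le_iff r _ _ ?_ exKeywordRanks a
  intro b p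
  cases hc : PySem.Chars.startswith (s.drop i) p.1.toList
  · simp
  · simp
    split_ifs <;> omega

theorem kw_ne_nil : ∀ p ∈ exKeywordRanks, p.1.toList ≠ [] := by decide

theorem exists_start_iff_isIn (s : List Char) (kw : List Char) (hk : kw ≠ []) :
    (∃ i ∈ List.range s.length, PySem.Chars.startswith (s.drop i) kw = true) ↔
      PySem.Chars.isIn kw s = true := by
  rw [← PySem.Chars.exists_prefix_drop_iff_isIn]
  simp only [List.mem_range, PySem.Chars.startswith_iff]
  constructor
  · rintro ⟨i, _, h⟩; exact ⟨i, h⟩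
  · rintro ⟨j, hj⟩
    by_cases hlt : j < s.length
    · exact ⟨j, hlt, hj⟩
    · exfalso
      rw [List.drop_eq_nil_of_le (le_of_not_gt hlt)] at hj
      exact hk (List.prefix_nil.mp hj)

theorem best_le_iff (t : String) (r : Nat) (hr : r < 5) :
    (List.range t.toList.length).foldl (scanPos t.toList) 5 ≤ r ↔
      ∃ p ∈ exKeywordRanks, p.2 ≤ r ∧ PySem.Str.isIn p.1 t = true := by
  rw [foldl_le_iff r _ (fun i => ∃ p ∈ exKeywordRanks, p.2 ≤ r ∧
        PySem.Chars.startswith (t.toList.drop i) p.1.toList = true)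
      (fun a i => scanPos_le_iff t.toList r i a)]
  constructor
  · rintro (h5 | ⟨i, hi, p, hp, hpr, hs⟩)
    · omega
    · refine ⟨p, hp, hpr, ?_⟩
      rw [PySem.Str.isIn_eq]
      exact (exists_start_iff_isIn t.toList p.1.toList
        (kw_ne_nil p hp)).mp
        ⟨i, hi, hs⟩
  · rintro ⟨p, hp, hpr, hin⟩
    right
    rw [PySem.Str.isIn_eq] at hin
    obtain ⟨i, hi, hs⟩ := (exists_start_iff_isIn t.toList p.1.toList
        (kw_ne_nil p hp)).mpr hin
    exact ⟨i, hi, p, hp, hpr, hs⟩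

theorem any_false_forall (l : List String) (f : String → Bool) (h : l.any f = false) :
    ∀ kw ∈ l, f kw = false := by
  intro kw hkw
  cases hfk : f kw
  · rfl
  · exfalso
    have htr : l.any f = true := List.any_eq_true.mpr ⟨kw, hkw, hfk⟩
    rw [htr] at h
    simp at h

theorem rank_grouped : ∀ p ∈ exKeywordRanks,
    (p.2 = 0 ∧ p.1 ∈ (["dumbbell", "db", "dumbell", "hammer curls", "bicep curl"] : List String)) ∨
    (p.2 = 1 ∧ p.1 ∈ (["barbell", "bb", "bench press", "squat", "deadlift"] : List String)) ∨
    (p.2 = 2 ∧ p.1 ∈ (["cable", "lat pull", "seated row", "tricep pushdown"] : List String)) ∨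
    (p.2 = 3 ∧ p.1 ∈ (["machine", "leg press", "leg extension", "seated"] : List String)) ∨
    (p.2 = 4 ∧ p.1 ∈ (["chin up", "pull up", "push up", "plank", "hanging"] : List String)) := by decide

theorem main_eq (t : String) :
    (if ["dumbbell", "db", "dumbell", "hammer curls", "bicep curl"].any
        (fun keyword => PySem.Str.isIn keyword t) then "dumbbell"
     else if ["barbell", "bb", "bench press", "squat", "deadlift"].any
        (fun keyword => PySem.Str.isIn keyword t) then "barbell"
     else if ["cable", "lat pull", "seated row", "tricep pushdown"].any
        (fun keyword => PySem.Str.isIn keyword t) then "cable"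
     else if ["machine", "leg press", "leg extension", "seated"].any
        (fun keyword => PySem.Str.isIn keyword t) then "machine"
     else if ["chin up", "pull up", "push up", "plank", "hanging"].any
        (fun keyword => PySem.Str.isIn keyword t) then "bodyweight"
     else "dumbbell")
    = (if (List.range t.toList.length).foldl (scanPos t.toList) 5 < 5 then
         exCategories.getD ((List.range t.toList.length).foldl (scanPos t.toList) 5) "dumbbell"
       else "dumbbell") := by
  have h0 := best_le_iff t 0 (by omega)
  have h1 := best_le_iff t 1 (by omega)
  have h2 := best_le_iff t 2 (by omega)
  have h3 := best_le_iff t 3 (by omega)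
  have h4 := best_le_iff t 4 (by omega)
  set best := (List.range t.toList.length).foldl (scanPos t.toList) 5 with hb
  cases e0 : (["dumbbell", "db", "dumbell", "hammer curls", "bicep curl"].any
      (fun keyword => PySem.Str.isIn keyword t)) with
  | true =>
      rw [if_pos rfl]
      have hle : best ≤ 0 := by
        simp only [List.any_eq_true, List.mem_cons, List.not_mem_nil, or_false] at e0
        obtain ⟨kw, hkw, hin⟩ := e0
        refine h0.mpr ?_
        rcases hkw with rfl|rfl|rfl|rfl|rfl
        · exact ⟨("dumbbell", 0), by decide, by decide, hin⟩
        · exact ⟨("db", 0), by decide, by decide, hin⟩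
        · exact ⟨("dumbell", 0), by decide, by decide, hin⟩
        · exact ⟨("hammer curls", 0), by decide, by decide, hin⟩
        · exact ⟨("bicep curl", 0), by decide, by decide, hin⟩
      have hbe : best = 0 := by omega
      rw [hbe]
      rfl
  | false =>
      rw [if_neg (by simp)]
      cases e1 : (["barbell", "bb", "bench press", "squat", "deadlift"].any
          (fun keyword => PySem.Str.isIn keyword t)) with
      | true =>
          rw [if_pos rfl]
          have hle : best ≤ 1 := by
            simp only [List.any_eq_true, List.mem_cons, List.not_mem_nil, or_false] at e1
            obtain ⟨kw, hkw, hin⟩ := e1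
            refine h1.mpr ?_
            rcases hkw with rfl|rfl|rfl|rfl|rfl
            · exact ⟨("barbell", 1), by decide, by decide, hin⟩
            · exact ⟨("bb", 1), by decide, by decide, hin⟩
            · exact ⟨("bench press", 1), by decide, by decide, hin⟩
            · exact ⟨("squat", 1), by decide, by decide, hin⟩
            · exact ⟨("deadlift", 1), by decide, by decide, hin⟩
          have hnot : ¬ best ≤ 0 := by
            intro hx
            obtain ⟨p, hp, hpr, hin⟩ := h0.mp hx
            rcases rank_grouped p hp with ⟨hq, hm⟩|⟨hq, hm⟩|⟨hq, hm⟩|⟨hq, hm⟩|⟨hq, hm⟩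
            · rw [show PySem.Str.isIn p.1 t = false from any_false_forall _ _ e0 p.1 hm] at hin
              exact Bool.false_ne_true hin
            · omega
            · omega
            · omega
            · omega
          have hbe : best = 1 := by omega
          rw [hbe]
          rfl
      | false =>
          rw [if_neg (by simp)]
          cases e2 : (["cable", "lat pull", "seated row", "tricep pushdown"].any
              (fun keyword => PySem.Str.isIn keyword t)) with
          | true =>
              rw [if_pos rfl]
              have hle : best ≤ 2 := by
                simp only [List.any_eq_true, List.mem_cons, List.not_mem_nil, or_false] at e2
                obtain ⟨kw, hkw, hin⟩ := e2
                refine h2.mpr ?_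
                rcases hkw with rfl|rfl|rfl|rfl
                · exact ⟨("cable", 2), by decide, by decide, hin⟩
                · exact ⟨("lat pull", 2), by decide, by decide, hin⟩
                · exact ⟨("seated row", 2), by decide, by decide, hin⟩
                · exact ⟨("tricep pushdown", 2), by decide, by decide, hin⟩
              have hnot : ¬ best ≤ 1 := by
                intro hx
                obtain ⟨p, hp, hpr, hin⟩ := h1.mp hx
                rcases rank_grouped p hp with ⟨hq, hm⟩|⟨hq, hm⟩|⟨hq, hm⟩|⟨hq, hm⟩|⟨hq, hm⟩
                · rw [show PySem.Str.isIn p.1 t = false from any_false_forall _ _ e0 p.1 hm] at hin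
                  exact Bool.false_ne_true hin
                · rw [show PySem.Str.isIn p.1 t = false from any_false_forall _ _ e1 p.1 hm] at hin
                  exact Bool.false_ne_true hin
                · omega
                · omega
                · omega
              have hbe : best = 2 := by omega
              rw [hbe]
              rfl
          | false =>
              rw [if_neg (by simp)]
              cases e3 : (["machine", "leg press", "leg extension", "seated"].any
                  (fun keyword => PySem.Str.isIn keyword t)) with
              | true =>
                  rw [if_pos rfl]
                  have hle : best ≤ 3 := by
                    simp only [List.any_eq_true, List.mem_cons, List.not_mem_nil, or_false] at e3
                    obtain ⟨kw, hkw, hin⟩ := e3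
                    refine h3.mpr ?_
                    rcases hkw with rfl|rfl|rfl|rfl
                    · exact ⟨("machine", 3), by decide, by decide, hin⟩
                    · exact ⟨("leg press", 3), by decide, by decide, hin⟩
                    · exact ⟨("leg extension", 3), by decide, by decide, hin⟩
                    · exact ⟨("seated", 3), by decide, by decide, hin⟩
                  have hnot : ¬ best ≤ 2 := by
                    intro hx
                    obtain ⟨p, hp, hpr, hin⟩ := h2.mp hx
                    rcases rank_grouped p hp with ⟨hq, hm⟩|⟨hq, hm⟩|⟨hq, hm⟩|⟨hq, hm⟩|⟨hq, hm⟩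
                    · rw [show PySem.Str.isIn p.1 t = false from any_false_forall _ _ e0 p.1 hm] at hin
                      exact Bool.false_ne_true hin
                    · rw [show PySem.Str.isIn p.1 t = false from any_false_forall _ _ e1 p.1 hm] at hin
                      exact Bool.false_ne_true hin
                    · rw [show PySem.Str.isIn p.1 t = false from any_false_forall _ _ e2 p.1 hm] at hin
                      exact Bool.false_ne_true hin
                    · omega
                    · omega
                  have hbe : best = 3 := by omega
                  rw [hbe]
                  rfl
              | false =>
                  rw [if_neg (by simp)]
                  cases e4 : (["chin up", "pull up", "push up", "plank", "hanging"].any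
                      (fun keyword => PySem.Str.isIn keyword t)) with
                  | true =>
                      rw [if_pos rfl]
                      have hle : best ≤ 4 := by
                        simp only [List.any_eq_true, List.mem_cons, List.not_mem_nil, or_false] at e4
                        obtain ⟨kw, hkw, hin⟩ := e4
                        refine h4.mpr ?_
                        rcases hkw with rfl|rfl|rfl|rfl|rfl
                        · exact ⟨("chin up", 4), by decide, by decide, hin⟩
                        · exact ⟨("pull up", 4), by decide, by decide, hin⟩
                        · exact ⟨("push up", 4), by decide, by decide, hin⟩
                        · exact ⟨("plank", 4), by decide, by decide, hin⟩
                        · exact ⟨("hanging", 4), by decide, by decide, hin⟩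
                      have hnot : ¬ best ≤ 3 := by
                        intro hx
                        obtain ⟨p, hp, hpr, hin⟩ := h3.mp hx
                        rcases rank_grouped p hp with ⟨hq, hm⟩|⟨hq, hm⟩|⟨hq, hm⟩|⟨hq, hm⟩|⟨hq, hm⟩
                        · rw [show PySem.Str.isIn p.1 t = false from any_false_forall _ _ e0 p.1 hm] at hin
                          exact Bool.false_ne_true hin
                        · rw [show PySem.Str.isIn p.1 t = false from any_false_forall _ _ e1 p.1 hm] at hin
                          exact Bool.false_ne_true hin
                        · rw [show PySem.Str.isIn p.1 t = false from any_false_forall _ _ e2 p.1 hm] at hin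
                          exact Bool.false_ne_true hin
                        · rw [show PySem.Str.isIn p.1 t = false from any_false_forall _ _ e3 p.1 hm] at hin
                          exact Bool.false_ne_true hin
                        · omega
                      have hbe : best = 4 := by omega
                      rw [hbe]
                      rfl
                  | false =>
                      rw [if_neg (by simp)]
                      have hnot : ¬ best ≤ 4 := by
                        intro hx
                        obtain ⟨p, hp, hpr, hin⟩ := h4.mp hx
                        rcases rank_grouped p hp with ⟨hq, hm⟩|⟨hq, hm⟩|⟨hq, hm⟩|⟨hq, hm⟩|⟨hq, hm⟩
                        · rw [show PySem.Str.isIn p.1 t = false from any_false_forall _ _ e0 p.1 hm] at hin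
                          exact Bool.false_ne_true hin
                        · rw [show PySem.Str.isIn p.1 t = false from any_false_forall _ _ e1 p.1 hm] at hin
                          exact Bool.false_ne_true hin
                        · rw [show PySem.Str.isIn p.1 t = false from any_false_forall _ _ e2 p.1 hm] at hin
                          exact Bool.false_ne_true hin
                        · rw [show PySem.Str.isIn p.1 t = false from any_false_forall _ _ e3 p.1 hm] at hin
                          exact Bool.false_ne_true hin
                        · rw [show PySem.Str.isIn p.1 t = false from any_false_forall _ _ e4 p.1 hm] at hin
                          exact Bool.false_ne_true hin
                      rw [if_neg (by omega)]

-- ===== VERDICTERDICT (by name: the statement is the Claim_ definition above) =====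
theorem get_exercise_type_spec : Claim_equal_get_exercise_type := by
  intro name _
  unfold Spec_get_exercise_type get_exercise_type get_exercise_type_alt
  exact main_eq (PySem.Str.lower name)
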